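-- pv_equiv track=rewrite | github.com/Joaquin120/TP-integrador-programacion1-Chiarello-Ontivero-comision3 | tp_integrador.py | contar_paises_por_continente
-- ===== SOURCE A (Python) =====
-- def contar_paises_por_continente(paises): #Cuenta cuántos países hay por cada continente
--
--     conteo_continentes = {} # Usamos un diccionario vacío para ser dinámicos
--     for pais in paises:
--         continente = pais["Continente"]
--         if continente not in conteo_continentes:
--             conteo_continentes[continente] = 0 # Si no existe, lo creamos
--         conteo_continentes[continente] += 1
--     return conteo_continentes
-- ===== SOURCE B (Python) =====
-- def contar_paises_por_continente(paises):
--     # Distinct-keys-then-recount decomposition instead of an incremental tally.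
--     conts = [p["Continente"] for p in paises]
--     return {c: conts.count(c) for c in dict.fromkeys(conts)}
-- ===== Notes on version B (the rewrite author's own statement) =====
-- stated objective: alternative
-- what changed: B replaces A's single-pass incremental dict tally with a two-phase decomposition: extract all continent labels, then build the result from the distinct labels (dict.fromkeys) by recounting each with list.count.
import Mathlib
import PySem

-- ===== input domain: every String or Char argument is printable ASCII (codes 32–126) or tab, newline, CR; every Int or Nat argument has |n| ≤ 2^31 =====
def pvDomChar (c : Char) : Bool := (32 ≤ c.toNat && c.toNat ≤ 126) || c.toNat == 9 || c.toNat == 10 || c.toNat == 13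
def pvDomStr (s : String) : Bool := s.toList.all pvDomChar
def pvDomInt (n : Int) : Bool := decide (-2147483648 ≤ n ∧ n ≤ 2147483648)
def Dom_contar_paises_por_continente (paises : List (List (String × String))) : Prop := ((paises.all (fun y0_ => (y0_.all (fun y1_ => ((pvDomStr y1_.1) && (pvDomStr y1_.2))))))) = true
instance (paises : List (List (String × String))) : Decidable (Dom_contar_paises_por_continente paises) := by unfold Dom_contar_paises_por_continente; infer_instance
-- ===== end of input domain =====

-- B: two-phase rewrite — list the continent labels, then recount each distinct label (no speed claim).
-- Equivalence is about the RETURN value; neither program mutates its argument.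
-- ===== PORT A =====
-- pais["Continente"] is (Dict.mk pais).getD "Continente" "": Pre_ guarantees the key is present,
-- so the default "" is never consulted inside Pre_ (Python raises KeyError exactly outside Pre_).
def contar_paises_por_continente (paises : List (List (String × String))) : List (String × Int) :=
  (paises.foldl (fun d pais =>
      let continente := (PySem.Dict.mk pais).getD "Continente" ""
      let d := if d.contains continente then d else d.insert continente 0
      d.insert continente (d.getD continente 0 + 1))
    PySem.Dict.empty).items

-- ===== PORT B =====
def contar_paises_por_continente_alt (paises : List (List (String × String))) : List (String × Int) :=
  let conts := paises.map (fun p => (PySem.Dict.mk p).getD "Continente" "")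
  (PySem.List.dedup conts).map (fun c => (c, (conts.count c : Int)))

-- ===== PRECONDITION & SPEC =====
-- Pre_ excludes exactly the inputs where some country record lacks the key "Continente": there Python A raises KeyError.
def Pre_contar_paises_por_continente (paises : List (List (String × String))) : Prop :=
  ∀ p ∈ paises, p.any (fun kv => kv.1 == "Continente") = true
instance (paises : List (List (String × String))) : Decidable (Pre_contar_paises_por_continente paises) := by
  unfold Pre_contar_paises_por_continente; infer_instance
def pvWitness_contar_paises_por_continente : (List (List (String × String))) :=
  [[("Nombre", "Japon"), ("Continente", "Asia")], [("Nombre", "Peru"), ("Continente", "America")]]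

def Spec_contar_paises_por_continente (paises : List (List (String × String))) (out : List (String × Int)) : Prop := out = contar_paises_por_continente_alt paises
instance (paises : List (List (String × String))) (out : List (String × Int)) : Decidable (Spec_contar_paises_por_continente paises out) := by unfold Spec_contar_paises_por_continente; infer_instance

-- ===== CLAIM (what is proved, stated in full; the proofs are below) =====
def Claim_equal_contar_paises_por_continente : Prop := ∀ (paises : List (List (String × String))), Dom_contar_paises_por_continente paises → Pre_contar_paises_por_continente paises → Spec_contar_paises_por_continente paises (contar_paises_por_continente paises)

-- ===== LEMMAS AND PROOFS =====

-- A's loop body (ensure key, then overwrite with +1) is the canonical counting step.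
theorem step_eq_counter_step (d : PySem.Dict String Int) (c : String) :
    (let d' := if d.contains c then d else d.insert c 0
     d'.insert c (d'.getD c 0 + 1)) = d.insert c (d.getD c 0 + 1) := by
  by_cases h : d.contains c = true
  · simp [h]
  · simp only [if_neg h]
    rw [PySem.Dict.getD_insert_self, PySem.Dict.insert_insert_self,
        PySem.Dict.getD_of_not_contains d 0 (by simpa using h)]

-- ===== VERDICT (by name: the statement is the Claim_ definition above) =====
theorem contar_paises_por_continente_spec : Claim_equal_contar_paises_por_continente := by
  intro paises _ _
  unfold Spec_contar_paises_por_continente contar_paises_por_continente contar_paises_por_continente_alt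
  rw [show (List.foldl
        (fun (d : PySem.Dict String Int) pais =>
          let continente := (PySem.Dict.mk pais).getD "Continente" ""
          let d := if d.contains continente then d else d.insert continente 0
          d.insert continente (d.getD continente 0 + 1))
        PySem.Dict.empty paises) =
      List.foldl
        (fun (d : PySem.Dict String Int) c =>
          let d' := if d.contains c then d else d.insert c 0
          d'.insert c (d'.getD c 0 + 1))
        PySem.Dict.empty (paises.map (fun p => (PySem.Dict.mk p).getD "Continente" ""))
    from by rw [List.foldl_map]]
  have hstep : ∀ (d : PySem.Dict String Int) (c : String),
      (let d' := if d.contains c then d else d.insert c 0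
       d'.insert c (d'.getD c 0 + 1)) = d.insert c (d.getD c 0 + 1) := step_eq_counter_step
  rw [show (fun (d : PySem.Dict String Int) (c : String) =>
        let d' := if d.contains c then d else d.insert c 0
        d'.insert c (d'.getD c 0 + 1)) = fun d c => d.insert c (d.getD c 0 + 1) from
      funext fun d => funext fun c => hstep d c]
  rw [PySem.Dict.foldl_insert_getD_add_one_eq_counter, PySem.Dict.items_counter]
  simp [PySem.List.dedup_eq_ofList]
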